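-- pv_equiv track=rewrite | github.com/lge0322/F2021_public | 15112-F21/Midterm2_Prep/s21.py | ct3
-- ===== SOURCE A (Python) =====
-- def ct3(n):
--     if (n == 0):
--         return (0, 1)
--     else:
--         x, y = ct3(n//10)
--         if (n%2 == 0):
--             return (x + (n%10), y)
--         else:
--             return (x, y * (n%10))
-- ===== SOURCE B (Python) =====
-- def ct3(n):
--     s, p = 0, 1
--     while n > 0:
--         d = n % 10
--         if d % 2 == 0:
--             s += d
--         else:
--             p *= d
--         n //= 10
--     return (s, p)
-- ===== Notes on version B (the rewrite author's own statement) =====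
-- stated objective: simpler
-- what changed: Replaces the recursive digit decomposition with an iterative while-loop that strips digits off the right, accumulating the even-digit sum and odd-digit product directly.
import Mathlib
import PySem

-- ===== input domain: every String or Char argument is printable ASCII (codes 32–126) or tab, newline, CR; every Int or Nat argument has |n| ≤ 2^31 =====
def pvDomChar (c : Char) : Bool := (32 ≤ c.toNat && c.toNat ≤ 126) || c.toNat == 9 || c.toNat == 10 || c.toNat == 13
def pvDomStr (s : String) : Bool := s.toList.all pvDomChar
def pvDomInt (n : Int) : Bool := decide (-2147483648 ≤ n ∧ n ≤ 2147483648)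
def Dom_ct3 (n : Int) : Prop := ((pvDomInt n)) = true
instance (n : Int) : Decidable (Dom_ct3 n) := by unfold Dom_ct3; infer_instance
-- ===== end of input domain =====

-- B replaces A's recursion with an iterative digit-stripping loop (same O(digits) cost, constant stack);
-- equivalence is claimed for 0 ≤ n, where A returns (A's recursion raises RecursionError for negative n).

-- ===== PORT A =====
-- Literal port of A's recursion; for n < 0 Python recurses forever (RecursionError),
-- which is outside Pre_ct3, so the port returns a dummy value there to be total.
def ct3 (n : Int) : Int × Int :=
  if n = 0 then (0, 1)
  else if n < 0 then (0, 1)   -- dummy: Python raises RecursionError here; excluded by Pre_ct3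
  else
    let xy := ct3 (PySem.Int.floordiv n 10)
    if PySem.Int.mod n 2 = 0 then (xy.1 + PySem.Int.mod n 10, xy.2)
    else (xy.1, xy.2 * PySem.Int.mod n 10)
termination_by n.toNat
decreasing_by
  rename_i h0 hneg
  rw [PySem.Int.floordiv_eq_ediv_of_pos (by omega)]
  omega

-- ===== PORT B =====
-- the while-loop of Source B: state (n, s, p)
def ct3Go (n s p : Int) : Int × Int :=
  if 0 < n then
    let d := PySem.Int.mod n 10
    if PySem.Int.mod d 2 = 0 then
      ct3Go (PySem.Int.floordiv n 10) (s + d) p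
    else
      ct3Go (PySem.Int.floordiv n 10) s (p * d)
  else (s, p)
termination_by n.toNat
decreasing_by
  all_goals (rename_i h _; rw [PySem.Int.floordiv_eq_ediv_of_pos (by omega)]; omega)

def ct3_alt (n : Int) : Int × Int := ct3Go n 0 1

-- ===== PRECONDITION & SPEC =====
-- Pre_ct3 excludes negative n, on which A's recursion never reaches 0 and raises RecursionError.
def Pre_ct3 (n : Int) : Prop := 0 ≤ n
instance (n : Int) : Decidable (Pre_ct3 n) := by unfold Pre_ct3; infer_instance
def pvWitness_ct3 : Int := (2468)

def Spec_ct3 (n : Int) (out : Int × Int) : Prop := out = ct3_alt n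
instance (n : Int) (out : Int × Int) : Decidable (Spec_ct3 n out) := by unfold Spec_ct3; infer_instance

-- ===== CLAIM (what is proved, stated in full; the proofs are below) =====
def Claim_equal_ct3 : Prop := ∀ (n : Int), Dom_ct3 n → Pre_ct3 n → Spec_ct3 n (ct3 n)

-- ===== LEMMAS AND PROOFS =====

-- loop invariant: for 0 ≤ n the loop folds A's recursive result into the accumulators
lemma ct3Go_eq (k : Nat) : ∀ (n s p : Int), 0 ≤ n → n.toNat ≤ k →
    ct3Go n s p = (s + (ct3 n).1, p * (ct3 n).2) := by
  induction k with
  | zero =>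
    intro n s p hn hk
    have hn0 : n = 0 := by omega
    subst hn0
    simp [ct3Go, ct3]
  | succ k ih =>
    intro n s p hn hk
    by_cases h0 : n = 0
    · subst h0; simp [ct3Go, ct3]
    · have hpos : 0 < n := by omega
      have hdiv : PySem.Int.floordiv n 10 = n / 10 :=
        PySem.Int.floordiv_eq_ediv_of_pos (by omega)
      have hmod : PySem.Int.mod n 10 = n % 10 :=
        PySem.Int.mod_eq_emod_of_pos (by omega)
      have hmod2 : PySem.Int.mod n 2 = n % 2 :=
        PySem.Int.mod_eq_emod_of_pos (by omega)
      have hd2 : PySem.Int.mod (n % 10) 2 = n % 2 := by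
        rw [PySem.Int.mod_eq_emod_of_pos (by omega : (0:Int) < 2)]; omega
      have hn' : 0 ≤ n / 10 := by omega
      have hk' : (n / 10).toNat ≤ k := by omega
      have iheq := fun s p => ih (n / 10) s p hn' hk'
      rw [ct3Go, ct3]
      simp only [if_pos hpos, if_neg h0, if_neg (by omega : ¬ n < 0), hdiv, hmod, hmod2, hd2]
      by_cases hev : n % 2 = 0
      · simp only [if_pos hev, iheq, Prod.mk.injEq]
        constructor <;> first | trivial | ring
      · simp only [if_neg hev, iheq, Prod.mk.injEq]
        constructor <;> first | trivial | ring

-- ===== VERDICT (by name: the statement is the Claim_ definition above) =====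
theorem ct3_spec : Claim_equal_ct3 := by
  intro n _ hpre
  unfold Spec_ct3 ct3_alt
  rw [ct3Go_eq n.toNat n 0 1 hpre (le_refl _)]
  simp
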